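-- pv_equiv track=rewrite | github.com/indroputranto/docling-fleet | process_vessel_latest.py | _identify_content_type
-- ===== SOURCE A (Python) =====
-- def _identify_content_type(heading: str) -> str:
--     """Identify content type from heading with enhanced semantic understanding"""
--     heading_lower = heading.lower()
--
--     # Charter Party Clauses - More specific identification
--     if "charter party" in heading_lower:
--         if "cargo exclusions" in heading_lower or "excluded cargo" in heading_lower:
--             return "charter_party_cargo_exclusions"
--         elif "trading exclusions" in heading_lower or "trading limits" in heading_lower:
--             return "charter_party_trading_exclusions"
--         elif "duration" in heading_lower or "description" in heading_lower:
--             return "charter_party_duration_description"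
--         elif "delivery" in heading_lower:
--             return "charter_party_delivery"
--         elif "redelivery" in heading_lower:
--             return "charter_party_redelivery"
--         elif "hire" in heading_lower or "payment" in heading_lower:
--             return "charter_party_hire_payment"
--         elif "bunkers" in heading_lower:
--             return "charter_party_bunkers"
--         return "charter_party_clause"
--
--     # Fixture Recap Sections - Enhanced categorization
--     if "fixture recap" in heading_lower:
--         if "trading" in heading_lower or "exclusions" in heading_lower:
--             return "fixture_recap_trading_exclusions"
--         elif "cargo" in heading_lower:
--             return "fixture_recap_cargo_details"
--         elif "account" in heading_lower:
--             return "fixture_recap_account"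
--         elif "period" in heading_lower:
--             return "fixture_recap_period"
--         elif "laycan" in heading_lower:
--             return "fixture_recap_laycan"
--         elif "delivery" in heading_lower:
--             return "fixture_recap_delivery"
--         elif "redelivery" in heading_lower:
--             return "fixture_recap_redelivery"
--         elif "hire" in heading_lower:
--             return "fixture_recap_hire"
--         elif "bunkers" in heading_lower:
--             return "fixture_recap_bunkers"
--         return "fixture_recap_general"
--
--     # Vessel Specifications - Detailed categorization
--     if any(term in heading_lower for term in ["vessel", "specification"]):
--         if "name" in heading_lower:
--             return "vessel_name"
--         elif "registration" in heading_lower: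
--             return "vessel_registration"
--         elif "tonnage" in heading_lower:
--             return "vessel_tonnage"
--         elif "dimensions" in heading_lower:
--             return "vessel_dimensions"
--         elif "equipment" in heading_lower:
--             return "vessel_equipment"
--         return "vessel_specification"
--
--     # Cargo Related Content - Specific identification
--     if "cargo" in heading_lower:
--         if "exclusions" in heading_lower:
--             return "cargo_exclusions_primary"  # Mark as primary source
--         elif "restrictions" in heading_lower:
--             return "cargo_restrictions"
--         elif "requirements" in heading_lower:
--             return "cargo_requirements"
--         return "cargo_related"
--
--     # Trading Related Content
--     if "trading" in heading_lower:
--         if "exclusions" in heading_lower or "restrictions" in heading_lower: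
--             return "trading_exclusions_primary"  # Mark as primary source
--         elif "limits" in heading_lower:
--             return "trading_limits"
--         return "trading_related"
--
--     return "general"
-- ===== SOURCE B (Python) =====
-- # Flat prioritized rule list: collect EVERY matching rule, return the one with the
-- # smallest priority via min() -- instead of A's short-circuiting nested if/elif tree.
-- # Each rule is (trigger_alternatives, keyword_alternatives_or_None, output); a rule
-- # with None keywords is a block default that matches whenever its trigger matches,
-- # so min() over all matches reproduces A's priority ordering exactly.
-- _FLAT = [
--     (("charter party",), ("cargo exclusions", "excluded cargo"), "charter_party_cargo_exclusions"),
--     (("charter party",), ("trading exclusions", "trading limits"), "charter_party_trading_exclusions"),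
--     (("charter party",), ("duration", "description"), "charter_party_duration_description"),
--     (("charter party",), ("delivery",), "charter_party_delivery"),
--     (("charter party",), ("redelivery",), "charter_party_redelivery"),
--     (("charter party",), ("hire", "payment"), "charter_party_hire_payment"),
--     (("charter party",), ("bunkers",), "charter_party_bunkers"),
--     (("charter party",), None, "charter_party_clause"),
--     (("fixture recap",), ("trading", "exclusions"), "fixture_recap_trading_exclusions"),
--     (("fixture recap",), ("cargo",), "fixture_recap_cargo_details"),
--     (("fixture recap",), ("account",), "fixture_recap_account"),
--     (("fixture recap",), ("period",), "fixture_recap_period"),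
--     (("fixture recap",), ("laycan",), "fixture_recap_laycan"),
--     (("fixture recap",), ("delivery",), "fixture_recap_delivery"),
--     (("fixture recap",), ("redelivery",), "fixture_recap_redelivery"),
--     (("fixture recap",), ("hire",), "fixture_recap_hire"),
--     (("fixture recap",), ("bunkers",), "fixture_recap_bunkers"),
--     (("fixture recap",), None, "fixture_recap_general"),
--     (("vessel", "specification"), ("name",), "vessel_name"),
--     (("vessel", "specification"), ("registration",), "vessel_registration"),
--     (("vessel", "specification"), ("tonnage",), "vessel_tonnage"),
--     (("vessel", "specification"), ("dimensions",), "vessel_dimensions"),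
--     (("vessel", "specification"), ("equipment",), "vessel_equipment"),
--     (("vessel", "specification"), None, "vessel_specification"),
--     (("cargo",), ("exclusions",), "cargo_exclusions_primary"),
--     (("cargo",), ("restrictions",), "cargo_restrictions"),
--     (("cargo",), ("requirements",), "cargo_requirements"),
--     (("cargo",), None, "cargo_related"),
--     (("trading",), ("exclusions", "restrictions"), "trading_exclusions_primary"),
--     (("trading",), ("limits",), "trading_limits"),
--     (("trading",), None, "trading_related"),
-- ]
--
-- def _identify_content_type(heading: str) -> str:
--     hl = heading.lower()
--     matches = [(i, out) for i, (trigs, kws, out) in enumerate(_FLAT)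
--                if any(t in hl for t in trigs)
--                and (kws is None or any(k in hl for k in kws))]
--     return min(matches)[1] if matches else "general"
-- ===== Notes on version B (the rewrite author's own statement) =====
-- stated objective: alternative
-- what changed: A's nested if/elif decision tree is replaced by a flat prioritized rule list: B collects every rule whose trigger and keyword alternatives match and returns the minimum-priority match via min(), with block defaults as keyword-free rules, instead of short-circuit branching.
import Mathlib
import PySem

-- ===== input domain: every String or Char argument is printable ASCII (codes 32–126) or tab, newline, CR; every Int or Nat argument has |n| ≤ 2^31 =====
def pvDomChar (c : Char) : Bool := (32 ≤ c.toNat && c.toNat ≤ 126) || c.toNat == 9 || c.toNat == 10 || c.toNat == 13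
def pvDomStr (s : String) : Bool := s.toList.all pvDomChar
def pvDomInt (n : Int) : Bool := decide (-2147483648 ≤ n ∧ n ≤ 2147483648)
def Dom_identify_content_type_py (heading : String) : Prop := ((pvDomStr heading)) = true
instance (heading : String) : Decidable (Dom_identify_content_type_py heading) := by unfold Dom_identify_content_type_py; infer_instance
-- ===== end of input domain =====

-- B replaces A's nested if/elif tree by a flat prioritized rule list: collect all matches, return the min-priority one (alternative; same cost).


-- ===== PORT A =====
def identify_content_type_py (heading : String) : String :=
  let hl := PySem.Str.lower heading
  if PySem.Str.isIn "charter party" hl then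
    if PySem.Str.isIn "cargo exclusions" hl || PySem.Str.isIn "excluded cargo" hl then "charter_party_cargo_exclusions"
    else if PySem.Str.isIn "trading exclusions" hl || PySem.Str.isIn "trading limits" hl then "charter_party_trading_exclusions"
    else if PySem.Str.isIn "duration" hl || PySem.Str.isIn "description" hl then "charter_party_duration_description"
    else if PySem.Str.isIn "delivery" hl then "charter_party_delivery"
    else if PySem.Str.isIn "redelivery" hl then "charter_party_redelivery"
    else if PySem.Str.isIn "hire" hl || PySem.Str.isIn "payment" hl then "charter_party_hire_payment"
    else if PySem.Str.isIn "bunkers" hl then "charter_party_bunkers"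
    else "charter_party_clause"
  else if PySem.Str.isIn "fixture recap" hl then
    if PySem.Str.isIn "trading" hl || PySem.Str.isIn "exclusions" hl then "fixture_recap_trading_exclusions"
    else if PySem.Str.isIn "cargo" hl then "fixture_recap_cargo_details"
    else if PySem.Str.isIn "account" hl then "fixture_recap_account"
    else if PySem.Str.isIn "period" hl then "fixture_recap_period"
    else if PySem.Str.isIn "laycan" hl then "fixture_recap_laycan"
    else if PySem.Str.isIn "delivery" hl then "fixture_recap_delivery"
    else if PySem.Str.isIn "redelivery" hl then "fixture_recap_redelivery"
    else if PySem.Str.isIn "hire" hl then "fixture_recap_hire"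
    else if PySem.Str.isIn "bunkers" hl then "fixture_recap_bunkers"
    else "fixture_recap_general"
  else if ["vessel", "specification"].any (fun term => PySem.Str.isIn term hl) then
    if PySem.Str.isIn "name" hl then "vessel_name"
    else if PySem.Str.isIn "registration" hl then "vessel_registration"
    else if PySem.Str.isIn "tonnage" hl then "vessel_tonnage"
    else if PySem.Str.isIn "dimensions" hl then "vessel_dimensions"
    else if PySem.Str.isIn "equipment" hl then "vessel_equipment"
    else "vessel_specification"
  else if PySem.Str.isIn "cargo" hl then
    if PySem.Str.isIn "exclusions" hl then "cargo_exclusions_primary"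
    else if PySem.Str.isIn "restrictions" hl then "cargo_restrictions"
    else if PySem.Str.isIn "requirements" hl then "cargo_requirements"
    else "cargo_related"
  else if PySem.Str.isIn "trading" hl then
    if PySem.Str.isIn "exclusions" hl || PySem.Str.isIn "restrictions" hl then "trading_exclusions_primary"
    else if PySem.Str.isIn "limits" hl then "trading_limits"
    else "trading_related"
  else "general"

-- ===== PORT B =====
-- flat prioritized rule list: (trigger alternatives, keyword alternatives or none = block default, output)
def pvFlat : List (List String × Option (List String) × String) :=
  [ (["charter party"], some ["cargo exclusions", "excluded cargo"], "charter_party_cargo_exclusions"),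
    (["charter party"], some ["trading exclusions", "trading limits"], "charter_party_trading_exclusions"),
    (["charter party"], some ["duration", "description"], "charter_party_duration_description"),
    (["charter party"], some ["delivery"], "charter_party_delivery"),
    (["charter party"], some ["redelivery"], "charter_party_redelivery"),
    (["charter party"], some ["hire", "payment"], "charter_party_hire_payment"),
    (["charter party"], some ["bunkers"], "charter_party_bunkers"),
    (["charter party"], none, "charter_party_clause"),
    (["fixture recap"], some ["trading", "exclusions"], "fixture_recap_trading_exclusions"),
    (["fixture recap"], some ["cargo"], "fixture_recap_cargo_details"),
    (["fixture recap"], some ["account"], "fixture_recap_account"),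
    (["fixture recap"], some ["period"], "fixture_recap_period"),
    (["fixture recap"], some ["laycan"], "fixture_recap_laycan"),
    (["fixture recap"], some ["delivery"], "fixture_recap_delivery"),
    (["fixture recap"], some ["redelivery"], "fixture_recap_redelivery"),
    (["fixture recap"], some ["hire"], "fixture_recap_hire"),
    (["fixture recap"], some ["bunkers"], "fixture_recap_bunkers"),
    (["fixture recap"], none, "fixture_recap_general"),
    (["vessel", "specification"], some ["name"], "vessel_name"),
    (["vessel", "specification"], some ["registration"], "vessel_registration"),
    (["vessel", "specification"], some ["tonnage"], "vessel_tonnage"),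
    (["vessel", "specification"], some ["dimensions"], "vessel_dimensions"),
    (["vessel", "specification"], some ["equipment"], "vessel_equipment"),
    (["vessel", "specification"], none, "vessel_specification"),
    (["cargo"], some ["exclusions"], "cargo_exclusions_primary"),
    (["cargo"], some ["restrictions"], "cargo_restrictions"),
    (["cargo"], some ["requirements"], "cargo_requirements"),
    (["cargo"], none, "cargo_related"),
    (["trading"], some ["exclusions", "restrictions"], "trading_exclusions_primary"),
    (["trading"], some ["limits"], "trading_limits"),
    (["trading"], none, "trading_related") ]

-- a rule matches: some trigger alternative occurs in hl, and (no keywords, or some keyword occurs)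
def pvMatch (hl : String) (trigs : List String) (kws : Option (List String)) : Bool :=
  trigs.any (fun t => PySem.Str.isIn t hl) &&
    (match kws with
     | none => true
     | some ks => ks.any (fun k => PySem.Str.isIn k hl))

-- Python's min() on (index, output) tuples: lexicographic, first extremal kept
def pvMinStep (best p : Int × String) : Int × String :=
  if p.1 < best.1 ∨ (p.1 = best.1 ∧ p.2 < best.2) then p else best

def identify_content_type_py_alt (heading : String) : String :=
  let hl := PySem.Str.lower heading
  let cands := (PySem.List.enumerate pvFlat 0).filterMap
    (fun p => if pvMatch hl p.2.1 p.2.2.1 then some (p.1, p.2.2.2) else none)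
  match cands with
  | [] => "general"
  | m :: ms => (ms.foldl pvMinStep m).2

-- ===== PRECONDITION & SPEC =====
def Spec_identify_content_type_py (heading : String) (out : String) : Prop := out = identify_content_type_py_alt heading
instance (heading : String) (out : String) : Decidable (Spec_identify_content_type_py heading out) := by unfold Spec_identify_content_type_py; infer_instance

-- ===== CLAIM =====
def Claim_equal_identify_content_type_py : Prop := ∀ (heading : String), Dom_identify_content_type_py heading → Spec_identify_content_type_py heading (identify_content_type_py heading)

-- ===== LEMMAS AND PROOFS =====

-- proof-side first-match scan of the flat rule list
def pvFirst (hl : String) : List (List String × Option (List String) × String) → String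
  | [] => "general"
  | (trigs, kws, out) :: rest => if pvMatch hl trigs kws then out else pvFirst hl rest

-- min-fold keeps the accumulator when every later index is strictly larger
theorem pv_fold_keep (ms : List (Int × String)) (best : Int × String)
    (h : ∀ p ∈ ms, best.1 < p.1) : ms.foldl pvMinStep best = best := by
  induction ms with
  | nil => rfl
  | cons q t ih =>
    have hq := h q (List.mem_cons_self ..)
    have : pvMinStep best q = best := by
      unfold pvMinStep
      rw [if_neg]; rintro (h1 | ⟨h2, _⟩) <;> omega
    simp only [List.foldl_cons, this]
    exact ih fun p hp => h p (List.mem_cons_of_mem _ hp)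

-- indices produced from enumerate starting at i+1 are all > i
theorem pv_idx_gt (hl : String) (l : List (List String × Option (List String) × String)) (i : Int) :
    ∀ p ∈ (PySem.List.enumerate l (i+1)).filterMap
        (fun p => if pvMatch hl p.2.1 p.2.2.1 then some (p.1, p.2.2.2) else none),
      i < p.1 := by
  intro p hp
  obtain ⟨q, hq, hf⟩ := List.mem_filterMap.1 hp
  obtain ⟨k, hk, rfl⟩ := (PySem.List.mem_enumerate_iff _ _ _).1 hq
  split at hf
  · cases hf; simp; omega
  · cases hf

-- min over all matches of the enumerated flat list = first-match scan
theorem pv_min_eq_first (hl : String) (l : List (List String × Option (List String) × String)) (i : Int) :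
    (match (PySem.List.enumerate l i).filterMap
        (fun p => if pvMatch hl p.2.1 p.2.2.1 then some (p.1, p.2.2.2) else none) with
     | [] => "general"
     | m :: ms => (ms.foldl pvMinStep m).2) = pvFirst hl l := by
  induction l generalizing i with
  | nil => rfl
  | cons r rest ih =>
    obtain ⟨trigs, kws, out⟩ := r
    rw [PySem.List.enumerate_cons, List.filterMap_cons]
    by_cases hm : pvMatch hl trigs kws
    · simp only [hm, if_pos, pvFirst]
      rw [pv_fold_keep _ _ (pv_idx_gt hl rest i)]
    · simp only [hm, pvFirst, Bool.false_eq_true, ite_false]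
      exact ih (i+1)

theorem pv_alt_eq_first (heading : String) :
    identify_content_type_py_alt heading = pvFirst (PySem.Str.lower heading) pvFlat := by
  unfold identify_content_type_py_alt
  exact pv_min_eq_first _ pvFlat 0

-- ===== VERDICT =====
theorem identify_content_type_py_spec : Claim_equal_identify_content_type_py := by
  intro heading _
  unfold Spec_identify_content_type_py
  rw [pv_alt_eq_first]
  unfold identify_content_type_py
  set hl := PySem.Str.lower heading with hhl
  by_cases h1 : PySem.Str.isIn "charter party" hl = true <;>
  by_cases h2 : PySem.Str.isIn "fixture recap" hl = true <;>
  by_cases h3 : (PySem.Str.isIn "vessel" hl || PySem.Str.isIn "specification" hl) = true <;>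
  by_cases h4 : PySem.Str.isIn "cargo" hl = true <;>
  by_cases h5 : PySem.Str.isIn "trading" hl = true <;>
  simp only [pvFlat, pvFirst, pvMatch, List.any_cons, List.any_nil, Bool.or_false,
    Bool.and_true, Bool.true_and, Bool.false_and, h1, h2, h3, h4, h5,
    Bool.false_eq_true, if_false, if_true]
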